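-- pv_equiv track=rewrite | github.com/victorhugochrisosthemos/beecrowd | nao_aceito-b2976.py | max_consecutive_triangle_subsequence
-- ===== SOURCE A (Python) =====
-- def max_consecutive_triangle_subsequence(arr):
--     max_len = 0
--     current_len = 0
--
--     for i in range(len(arr) - 2):
--         a, b, c = sorted(arr[i:i + 3])
--         if a + b > c:
--             current_len += 1 if current_len else 3
--         else:
--             max_len = max(max_len, current_len)
--             current_len = 0
--
--     max_len = max(max_len, current_len)
--     return max_len
-- ===== SOURCE B (Python) =====
-- def max_consecutive_triangle_subsequence(arr):
--     # Pass 1: one boolean per 3-window saying whether it forms a valid triangle.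
--     valid = []
--     for i in range(len(arr) - 2):
--         a, b, c = sorted(arr[i:i + 3])
--         valid.append(a + b > c)
--     # Pass 2: longest run of consecutive True windows.
--     best = 0
--     cur = 0
--     for v in valid:
--         if v:
--             cur += 1
--         else:
--             if cur > best:
--                 best = cur
--             cur = 0
--     if cur > best:
--         best = cur
--     # A run of k valid windows covers k + 2 array elements.
--     return best + 2 if best > 0 else 0
-- ===== Notes on version B (the rewrite author's own statement) =====
-- stated objective: alternative
-- what changed: B splits the work into two differently-shaped passes: it first materialises a boolean validity flag per 3-window, then scans that list for the longest run of Trues counted in windows, converting to the 3,4,5,... element count (+2 when positive) only at the end, instead of A's single fold that mixes element counting (the '+=1 if current else 3' trick) with the max bookkeeping.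
import Mathlib
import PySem

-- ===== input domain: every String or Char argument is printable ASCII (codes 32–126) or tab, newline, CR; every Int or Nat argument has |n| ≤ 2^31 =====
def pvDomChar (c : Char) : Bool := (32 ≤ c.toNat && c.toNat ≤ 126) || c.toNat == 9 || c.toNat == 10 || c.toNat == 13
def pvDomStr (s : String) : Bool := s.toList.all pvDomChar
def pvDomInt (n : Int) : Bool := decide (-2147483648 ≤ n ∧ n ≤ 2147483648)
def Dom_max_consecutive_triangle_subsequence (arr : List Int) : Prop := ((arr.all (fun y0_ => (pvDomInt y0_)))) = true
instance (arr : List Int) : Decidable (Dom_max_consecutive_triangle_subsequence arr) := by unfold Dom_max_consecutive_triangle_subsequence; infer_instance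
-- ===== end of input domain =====

-- B: same O(n) task split into two differently-shaped passes (per-window validity flags,
-- then a longest-run scan in window counts, converted to element counts at the end);
-- alternative decomposition, not claimed faster.


-- ===== PORT A =====
def max_consecutive_triangle_subsequence (arr : List Int) : Int :=
  let st := (PySem.List.pyRange 0 ((arr.length : Int) - 2) 1).foldl
    (fun (s : Int × Int) i =>
      match PySem.List.sorted (PySem.List.slice arr (some i) (some (i + 3))) (fun x => x) false with
      | [a, b, c] =>
          if a + b > c then (s.1, s.2 + (if s.2 ≠ 0 then 1 else 3))
          else (max s.1 s.2, 0)
      | _ => (max s.1 s.2, 0)   -- unreachable: each slice arr[i:i+3] has exactly 3 elements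
    ) ((0 : Int), (0 : Int))
  max st.1 st.2

-- ===== PORT B =====
-- helper of B: whether the sorted 3-window starting at i is a valid triangle
def pvValid (arr : List Int) (i : Int) : Bool :=
  match PySem.List.sorted (PySem.List.slice arr (some i) (some (i + 3))) (fun x => x) false with
  | [] => false        -- unreachable: each slice arr[i:i+3] has exactly 3 elements
  | [_] => false       -- unreachable
  | [_, _] => false    -- unreachable
  | [a, b, c] => decide (a + b > c)
  | _ :: _ :: _ :: _ :: _ => false   -- unreachable

def max_consecutive_triangle_subsequence_alt (arr : List Int) : Int :=
  let valid := (PySem.List.pyRange 0 ((arr.length : Int) - 2) 1).map (pvValid arr)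
  let q := valid.foldl
    (fun (s : Int × Int) v =>
      if v then (s.1, s.2 + 1)
      else (if s.2 > s.1 then s.2 else s.1, 0)) ((0 : Int), (0 : Int))
  let best := if q.2 > q.1 then q.2 else q.1
  if best > 0 then best + 2 else 0

-- ===== PRECONDITION & SPEC =====
def Spec_max_consecutive_triangle_subsequence (arr : List Int) (out : Int) : Prop := out = max_consecutive_triangle_subsequence_alt arr
instance (arr : List Int) (out : Int) : Decidable (Spec_max_consecutive_triangle_subsequence arr out) := by unfold Spec_max_consecutive_triangle_subsequence; infer_instance

-- ===== CLAIM (what is proved, stated in full; the proofs are below) =====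
def Claim_equal_max_consecutive_triangle_subsequence : Prop := ∀ (arr : List Int), Dom_max_consecutive_triangle_subsequence arr → Spec_max_consecutive_triangle_subsequence arr (max_consecutive_triangle_subsequence arr)

-- ===== LEMMAS AND PROOFS =====
-- A's fold step, abstracted over the per-window validity bit
def pvStepA (s : Int × Int) (v : Bool) : Int × Int :=
  if v then (s.1, s.2 + (if s.2 ≠ 0 then 1 else 3)) else (max s.1 s.2, 0)

-- B's run-scan step
def pvStepB (s : Int × Int) (v : Bool) : Int × Int :=
  if v then (s.1, s.2 + 1) else (if s.2 > s.1 then s.2 else s.1, 0)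

-- run length (in windows) → element count
def pvConv (r : Int) : Int := if r > 0 then r + 2 else 0

lemma pvBodyA_eq (arr : List Int) :
    (fun (s : Int × Int) (i : Int) =>
      match PySem.List.sorted (PySem.List.slice arr (some i) (some (i + 3))) (fun x => x) false with
      | [a, b, c] =>
          if a + b > c then (s.1, s.2 + (if s.2 ≠ 0 then 1 else 3))
          else (max s.1 s.2, 0)
      | _ => (max s.1 s.2, 0))
    = fun s i => pvStepA s (pvValid arr i) := by
  funext s i
  unfold pvValid pvStepA
  rcases PySem.List.sorted (PySem.List.slice arr (some i) (some (i + 3))) (fun x => x) false with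
    _ | ⟨a, _ | ⟨b, _ | ⟨c, _ | _⟩⟩⟩
  · rfl
  · rfl
  · rfl
  · by_cases hab : a + b > c <;> simp [hab]
  · rfl

lemma pvStepB_nonneg (vs : List Bool) : ∀ (b cu : Int), 0 ≤ b → 0 ≤ cu →
    0 ≤ (vs.foldl pvStepB (b, cu)).1 ∧ 0 ≤ (vs.foldl pvStepB (b, cu)).2 := by
  induction vs with
  | nil => intro b cu hb hcu; exact ⟨hb, hcu⟩
  | cons v tl ih =>
      intro b cu hb hcu
      cases v
      · simpa [pvStepB] using ih _ 0 (by split <;> omega) le_rfl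
      · simpa [pvStepB] using ih b (cu + 1) hb (by omega)

lemma pvMax_conv (b cu : Int) (hb : 0 ≤ b) (hcu : 0 ≤ cu) :
    max (pvConv b) (pvConv cu) = pvConv (if cu > b then cu else b) := by
  simp only [pvConv, max_def]
  split_ifs <;> omega

lemma pvFold_eq (vs : List Bool) : ∀ (b cu : Int), 0 ≤ b → 0 ≤ cu →
    vs.foldl pvStepA (pvConv b, pvConv cu)
      = ((vs.foldl pvStepB (b, cu)).1 |> pvConv, (vs.foldl pvStepB (b, cu)).2 |> pvConv) := by
  induction vs with
  | nil => intro b cu hb hcu; rfl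
  | cons v tl ih =>
      intro b cu hb hcu
      cases v
      · have h1 : pvStepA (pvConv b, pvConv cu) false
            = (pvConv (if cu > b then cu else b), pvConv 0) := by
          rw [show pvStepA (pvConv b, pvConv cu) false = (max (pvConv b) (pvConv cu), 0) from rfl,
              pvMax_conv b cu hb hcu]
          rfl
        have h2 : pvStepB (b, cu) false = (if cu > b then cu else b, 0) := rfl
        simp only [List.foldl_cons, h1, h2]
        exact ih _ 0 (by split <;> omega) le_rfl
      · have h1 : pvStepA (pvConv b, pvConv cu) true = (pvConv b, pvConv (cu + 1)) := by
          simp only [pvStepA, pvConv, if_true]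
          split_ifs <;> simp_all <;> omega
        have h2 : pvStepB (b, cu) true = (b, cu + 1) := rfl
        simp only [List.foldl_cons, h1, h2]
        exact ih b (cu + 1) hb (by omega)

-- ===== VERDICT (by name: the statement is the Claim_ definition above) =====
theorem max_consecutive_triangle_subsequence_spec : Claim_equal_max_consecutive_triangle_subsequence := by
  intro arr _
  unfold Spec_max_consecutive_triangle_subsequence
  unfold max_consecutive_triangle_subsequence max_consecutive_triangle_subsequence_alt
  rw [pvBodyA_eq arr]
  rw [← List.foldl_map]
  set vs := (PySem.List.pyRange 0 ((arr.length : Int) - 2) 1).map (pvValid arr) with hvs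
  have hB : (fun (s : Int × Int) (v : Bool) =>
      if v then (s.1, s.2 + 1) else (if s.2 > s.1 then s.2 else s.1, 0)) = pvStepB := rfl
  rw [hB]
  have h0 : ((0 : Int), (0 : Int)) = (pvConv 0, pvConv 0) := rfl
  rw [h0, pvFold_eq vs 0 0 le_rfl le_rfl]
  obtain ⟨h1, h2⟩ := pvStepB_nonneg vs 0 0 le_rfl le_rfl
  simp only
  rw [pvMax_conv _ _ h1 h2]
  rfl
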